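-- pv_equiv track=rewrite | github.com/VladimirSiTozi/Python-Fundamentals | my_course/exercises8_text_procesing/explode_str.py | explode_string
-- ===== SOURCE A (Python) =====
-- def explode_string(input_string):
--     result = []
--     i = 0
--
--     while i < len(input_string):
--         char = input_string[i]
--
--         if char == '>':
--             strength = int(input_string[i + 1])
--             i += 2
--             while i < len(input_string) and input_string[i] == '>':
--                 strength += int(input_string[i + 1])
--                 i += 2
--
--             if result and strength > 0:
--                 result.pop()
--
--             i -= 1  # Decrement i so that the current '>' is not skipped
--         else:
--             result.append(char)
--
--         i += 1
--
--     return ''.join(result)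
-- ===== SOURCE B (Python) =====
-- def explode_string(input_string):
--     # Right-to-left scan with a pending-pop counter instead of a stack with pops.
--     s = input_string
--     kept = []
--     pending = 0
--     j = len(s)  # characters s[0:j] remain to be processed
--     while j > 0:
--         if j >= 2 and s[j - 2] == '>':
--             # a maximal run of '>d' pairs, read right-to-left
--             popped = False
--             while j >= 2 and s[j - 2] == '>':
--                 popped = popped or int(s[j - 1]) > 0
--                 j -= 2
--             if popped:
--                 pending += 1
--         elif pending:
--             pending -= 1
--             j -= 1
--         else:
--             kept.append(s[j - 1])
--             j -= 1
--     return ''.join(reversed(kept))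
-- ===== Notes on version B (the rewrite author's own statement) =====
-- stated objective: alternative
-- what changed: B scans the string right-to-left with a pending-pop counter (each nonzero '>' group increments it, each ordinary character either cancels one pending pop or is kept), instead of A's left-to-right stack that pushes characters and pops on each group; Pre_ excludes strings where some '>' is not followed by an ASCII digit, on which A raises IndexError/ValueError.
import Mathlib
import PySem

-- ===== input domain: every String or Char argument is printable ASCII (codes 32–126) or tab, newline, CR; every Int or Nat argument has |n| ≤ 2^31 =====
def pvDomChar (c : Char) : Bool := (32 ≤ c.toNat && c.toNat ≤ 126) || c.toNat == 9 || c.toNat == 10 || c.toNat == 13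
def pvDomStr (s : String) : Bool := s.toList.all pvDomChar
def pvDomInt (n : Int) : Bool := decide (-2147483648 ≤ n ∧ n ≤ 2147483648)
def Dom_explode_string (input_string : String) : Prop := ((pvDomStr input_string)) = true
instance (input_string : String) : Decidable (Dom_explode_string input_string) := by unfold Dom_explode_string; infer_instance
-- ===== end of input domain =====

-- B differs from A only in traversal strategy (right-to-left with a pending-pop counter
-- instead of a left-to-right stack); on every input admitted by Pre_ they return the same string.

-- int(c) for a single digit character; Pre_ excludes every input on which Python's int() here
-- sees a non-digit (ValueError) or runs past the end of the string (IndexError).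
def pvCharInt (c : Char) : Int := (c.toNat : Int) - 48

-- ===== PORT A =====
-- inner `while i < len(s) and s[i] == '>'` loop of A
def pvInnerA (l : List Char) (strength : Int) (i : Nat) : Int × Nat :=
  if h : i < l.length ∧ l.getD i ' ' = '>' then
    pvInnerA l (strength + pvCharInt (l.getD (i + 1) ' ')) (i + 2)
  else (strength, i)
termination_by l.length - i
decreasing_by exact Nat.sub_lt_sub_left h.1 (Nat.lt_add_of_pos_right (by decide))

theorem pvInnerA_ge (l : List Char) (s : Int) (i : Nat) : i ≤ (pvInnerA l s i).2 := by
  refine pvInnerA.induct l (fun s i => i ≤ (pvInnerA l s i).2) ?_ ?_ s i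
  · intro s i h ih; rw [pvInnerA, dif_pos h]; omega
  · intro s i h; rw [pvInnerA, dif_neg h]

theorem pvLoopA_dec (l : List Char) (st : Int) (i : Nat) (h : i < l.length) :
    l.length - ((pvInnerA l st (i + 2)).2 - 1 + 1) < l.length - i := by
  have := pvInnerA_ge l st (i + 2)
  omega

-- outer `while i < len(s)` loop of A
def pvLoopA (l : List Char) (result : List Char) (i : Nat) : List Char :=
  if h : i < l.length then
    let c := l.getD i ' '
    if c = '>' then
      let pj := pvInnerA l (pvCharInt (l.getD (i + 1) ' ')) (i + 2)
      pvLoopA l (if result ≠ [] ∧ 0 < pj.1 then result.dropLast else result) (pj.2 - 1 + 1)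
    else
      pvLoopA l (result ++ [c]) (i + 1)
  else result
termination_by l.length - i
decreasing_by
  · exact pvLoopA_dec l (pvCharInt (l.getD (i + 1) ' ')) i h
  · exact Nat.sub_lt_sub_left h (Nat.lt_succ_self i)

def explode_string (input_string : String) : String :=
  String.ofList (pvLoopA input_string.toList [] 0)

-- ===== PORT B =====
-- inner `while j >= 2 and s[j-2] == '>'` loop of B
def pvInnerB (l : List Char) (popped : Bool) (j : Nat) : Bool × Nat :=
  if h : 2 ≤ j ∧ l.getD (j - 2) ' ' = '>' then
    pvInnerB l (popped || decide (0 < pvCharInt (l.getD (j - 1) ' '))) (j - 2)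
  else (popped, j)
termination_by j
decreasing_by exact Nat.sub_lt (Nat.lt_of_lt_of_le (by decide) h.1) (by decide)

theorem pvInnerB_le (l : List Char) (b : Bool) (j : Nat) : (pvInnerB l b j).2 ≤ j := by
  refine pvInnerB.induct l (fun b j => (pvInnerB l b j).2 ≤ j) ?_ ?_ b j
  · intro b j h ih; rw [pvInnerB, dif_pos h]; omega
  · intro b j h; rw [pvInnerB, dif_neg h]

theorem pvInnerB_lt (l : List Char) (b : Bool) (j : Nat)
    (h : 2 ≤ j ∧ l.getD (j - 2) ' ' = '>') : (pvInnerB l b j).2 < j := by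
  rw [pvInnerB, dif_pos h]
  have := pvInnerB_le l (b || decide (0 < pvCharInt (l.getD (j - 1) ' '))) (j - 2)
  omega

-- outer `while j > 0` loop of B
def pvLoopB (l : List Char) (kept : List Char) (pending : Nat) (j : Nat) : List Char :=
  if h : 0 < j then
    if hg : 2 ≤ j ∧ l.getD (j - 2) ' ' = '>' then
      let pj := pvInnerB l false j
      pvLoopB l kept (if pj.1 then pending + 1 else pending) pj.2
    else if 0 < pending then
      pvLoopB l kept (pending - 1) (j - 1)
    else
      pvLoopB l (kept ++ [l.getD (j - 1) ' ']) pending (j - 1)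
  else kept
termination_by j
decreasing_by
  · exact pvInnerB_lt l false j hg
  · exact Nat.sub_lt h (by decide)
  · exact Nat.sub_lt h (by decide)

def explode_string_alt (input_string : String) : String :=
  String.ofList (pvLoopB input_string.toList [] 0 input_string.toList.length).reverse

-- ===== PRECONDITION & SPEC =====
-- Pre_ excludes exactly the strings on which A raises: some '>' not immediately followed by
-- an ASCII digit (int() there raises ValueError, or IndexError when the '>' is the last char).
def Pre_explode_string (input_string : String) : Prop :=
  ∀ i ∈ List.range input_string.toList.length,
    input_string.toList.getD i ' ' = '>' →
      (input_string.toList.getD (i + 1) ' ').isDigit = true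
instance (input_string : String) : Decidable (Pre_explode_string input_string) := by
  unfold Pre_explode_string; infer_instance

def pvWitness_explode_string : String := "ab>1c>0"

def Spec_explode_string (input_string : String) (out : String) : Prop := out = explode_string_alt input_string
instance (input_string : String) (out : String) : Decidable (Spec_explode_string input_string out) := by unfold Spec_explode_string; infer_instance

-- ===== CLAIM (what is proved, stated in full; the proofs are below) =====
def Claim_equal_explode_string : Prop := ∀ (input_string : String), Dom_explode_string input_string → Pre_explode_string input_string → Spec_explode_string input_string (explode_string input_string)

-- ===== LEMMAS AND PROOFS =====

-- ---- token view of the string: maximal runs of '>d' pairs vs ordinary characters ----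
inductive PvTok where
  | chr : Char → PvTok
  | grp : List Char → PvTok

def pvPairs (ds : List Char) : List Char := ds.flatMap (fun d => ['>', d])

def pvChars : PvTok → List Char
  | .chr c => [c]
  | .grp ds => pvPairs ds

def pvFlat (ts : List PvTok) : List Char := ts.flatMap pvChars

def pvSum (ds : List Char) : Int := (ds.map pvCharInt).sum

def pvAnyPos (ds : List Char) : Bool := ds.any (fun d => decide (0 < pvCharInt d))

-- digits of the maximal leading run of '>d' pairs, and the remaining suffix
def pvGpD : List Char → List Char × List Char
  | c :: d :: rest => if c = '>' then ((d :: (pvGpD rest).1), (pvGpD rest).2) else ([], c :: d :: rest)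
  | l => ([], l)

def pvWf1 : PvTok → Prop
  | .chr c => c ≠ '>'
  | .grp ds => ds ≠ [] ∧ ∀ d ∈ ds, d.isDigit = true

def pvIsGrp : PvTok → Bool
  | .grp _ => true
  | .chr _ => false

def pvNoAdj (a b : PvTok) : Prop := ¬(pvIsGrp a = true ∧ pvIsGrp b = true)

-- Pre_, restated on the char list
def pvP (l : List Char) : Prop :=
  ∀ i, i < l.length → l.getD i ' ' = '>' → (l.getD (i + 1) ' ').isDigit = true

theorem pvGpD_len : ∀ l : List Char, (pvGpD l).2.length ≤ l.length := by
  intro l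
  match l with
  | [] => simp [pvGpD]
  | [_] => simp [pvGpD]
  | c :: d :: rest =>
    have ih := pvGpD_len rest
    by_cases h : c = '>' <;> simp [pvGpD, h]
    omega

def pvTokF (l : List Char) : List PvTok :=
  match l with
  | [] => []
  | c :: rest =>
    if h : c = '>' then
      match rest with
      | [] => []
      | d :: rest' => PvTok.grp (pvGpD (c :: d :: rest')).1 :: pvTokF (pvGpD (c :: d :: rest')).2
    else PvTok.chr c :: pvTokF rest
termination_by l.length
decreasing_by
  · have h1 := pvGpD_len rest'
    simp only [pvGpD, if_pos h, List.length_cons]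
    omega
  · simp

-- A's stack semantics over tokens
def pvSpecA (res : List Char) : List PvTok → List Char
  | [] => res
  | .chr c :: ts => pvSpecA (res ++ [c]) ts
  | .grp ds :: ts => pvSpecA (if res ≠ [] ∧ 0 < pvSum ds then res.dropLast else res) ts

-- B's pending-counter semantics, one token (consumed right-to-left)
def pvStepB (st : Nat × List Char) (t : PvTok) : Nat × List Char :=
  match t with
  | .chr c => if 0 < st.1 then (st.1 - 1, st.2) else (st.1, st.2 ++ [c])
  | .grp ds => (if pvAnyPos ds then st.1 + 1 else st.1, st.2)

def pvDropN (n : Nat) (l : List Char) : List Char := l.take (l.length - n)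

-- ---- small indexing facts ----
theorem pvGetD_drop (l : List Char) (i r : Nat) : (l.drop i).getD r ' ' = l.getD (i + r) ' ' := by
  simp [List.getD_eq_getElem?_getD, List.getElem?_drop]

theorem pvGetD_take (l : List Char) (j i : Nat) (h : i < j) : (l.take j).getD i ' ' = l.getD i ' ' := by
  simp [List.getD_eq_getElem?_getD, h]

theorem pvP_drop {l : List Char} (h : pvP l) (m : Nat) : pvP (l.drop m) := by
  intro i hi hc
  have h1 : m + i < l.length := by
    simp at hi; omega
  have := h (m + i) h1 (by rw [← pvGetD_drop]; exact hc)
  rw [pvGetD_drop]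
  exact (by rw [show m + i + 1 = m + (i+1) by omega] at this; exact this)

theorem pvP_succ_lt {l : List Char} {i : Nat} (h : pvP l) (hi : i < l.length)
    (hc : l.getD i ' ' = '>') : i + 1 < l.length := by
  by_contra hn
  have h2 := h i hi hc
  rw [List.getD_eq_getElem?_getD] at h2
  rw [List.getElem?_eq_none (by omega)] at h2
  simp at h2

-- ---- pvGpD facts ----
theorem pvPairs_length (ds : List Char) : (pvPairs ds).length = 2 * ds.length := by
  induction ds with
  | nil => simp [pvPairs]
  | cons d t ih => simp [pvPairs] at ih ⊢; omega

theorem pvPairs_append (a b : List Char) : pvPairs (a ++ b) = pvPairs a ++ pvPairs b := by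
  simp [pvPairs]

theorem pvGpD_flat : ∀ l : List Char, pvPairs (pvGpD l).1 ++ (pvGpD l).2 = l := by
  intro l
  match l with
  | [] => simp [pvGpD, pvPairs]
  | [c] => simp [pvGpD, pvPairs]
  | c :: d :: rest =>
    have ih := pvGpD_flat rest
    by_cases h : c = '>' <;> simp [pvGpD, h, pvPairs]
    simp [pvPairs] at ih
    exact ih

theorem pvGpD_snd_drop (l : List Char) : (pvGpD l).2 = l.drop (2 * (pvGpD l).1.length) := by
  have h := pvGpD_flat l
  have hlen : (pvPairs (pvGpD l).1).length = 2 * (pvGpD l).1.length := pvPairs_length _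
  calc (pvGpD l).2 = ((pvPairs (pvGpD l).1) ++ (pvGpD l).2).drop (pvPairs (pvGpD l).1).length :=
        List.drop_left.symm
    _ = l.drop (2 * (pvGpD l).1.length) := by rw [h, hlen]

theorem pvGpD_digits : ∀ l : List Char, pvP l → ∀ d ∈ (pvGpD l).1, d.isDigit = true := by
  intro l
  match l with
  | [] => simp [pvGpD]
  | [c] => simp [pvGpD]
  | c :: d :: rest =>
    intro hP
    by_cases h : c = '>'
    · subst h
      have hd : d.isDigit = true := by
        have := hP 0 (by simp) (by simp)
        simpa using this
      have ih := pvGpD_digits rest (by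
        have := pvP_drop hP 2
        simpa using this)
      simp [pvGpD]
      exact ⟨hd, ih⟩
    · simp [pvGpD, h]

theorem pvGpD_stop : ∀ l : List Char,
    (pvGpD l).2 = [] ∨ ∃ c rest, (pvGpD l).2 = c :: rest ∧ (rest = [] ∨ c ≠ '>') := by
  intro l
  match l with
  | [] => simp [pvGpD]
  | [c] => simp [pvGpD]
  | c :: d :: rest =>
    by_cases h : c = '>'
    · simpa [pvGpD, h] using pvGpD_stop rest
    · right; exact ⟨c, d :: rest, by simp [pvGpD, h], Or.inr h⟩

-- ---- pvTokF equations ----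
theorem pvTokF_nil : pvTokF [] = [] := by rw [pvTokF]

theorem pvTokF_gt (d : Char) (rest : List Char) :
    pvTokF ('>' :: d :: rest) =
      PvTok.grp (pvGpD ('>' :: d :: rest)).1 :: pvTokF (pvGpD ('>' :: d :: rest)).2 := by
  rw [pvTokF]; simp

theorem pvTokF_single_gt : pvTokF ['>'] = [] := by rw [pvTokF]; simp

theorem pvTokF_chr {c : Char} (rest : List Char) (h : c ≠ '>') :
    pvTokF (c :: rest) = PvTok.chr c :: pvTokF rest := by
  rw [pvTokF.eq_def]; simp [h]

theorem pvTokF_head_not_grp (r : List Char)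
    (h : r = [] ∨ ∃ c rest, r = c :: rest ∧ (rest = [] ∨ c ≠ '>')) :
    ∀ t ∈ (pvTokF r).head?, pvIsGrp t = false := by
  rcases h with h | ⟨c, rest, hr, h2⟩
  · subst h; simp [pvTokF_nil]
  · subst hr
    rcases h2 with h2 | h2
    · subst h2
      by_cases hc : c = '>'
      · subst hc; simp [pvTokF_single_gt]
      · simp [pvTokF_chr _ hc, pvIsGrp]
    · simp [pvTokF_chr _ h2, pvIsGrp]

-- tokenisation is exact under pvP
theorem pvTok_spec : ∀ l : List Char, pvP l →
    pvFlat (pvTokF l) = l ∧ (∀ t ∈ pvTokF l, pvWf1 t) ∧ List.IsChain pvNoAdj (pvTokF l) := by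
  suffices H : ∀ n (l : List Char), l.length ≤ n → pvP l →
      pvFlat (pvTokF l) = l ∧ (∀ t ∈ pvTokF l, pvWf1 t) ∧ List.IsChain pvNoAdj (pvTokF l) by
    exact fun l hP => H l.length l (le_refl _) hP
  intro n
  induction n with
  | zero =>
    intro l hl _
    have : l = [] := by cases l <;> simp_all
    subst this
    simp [pvTokF_nil, pvFlat]
  | succ n ih =>
    intro l hl hP
    match l with
    | [] => simp [pvTokF_nil, pvFlat]
    | c :: rest =>
      by_cases hc : c = '>'
      · subst hc
        match rest with
        | [] =>
          have := hP 0 (by simp) (by simp)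
          simp at this
        | d :: rest' =>
          have hgp : pvGpD ('>' :: d :: rest') =
              (d :: (pvGpD rest').1, (pvGpD rest').2) := by simp [pvGpD]
          have hsnd : (pvGpD ('>' :: d :: rest')).2 =
              ('>' :: d :: rest').drop (2 * (pvGpD ('>' :: d :: rest')).1.length) :=
            pvGpD_snd_drop _
          have hlen2 : (pvGpD ('>' :: d :: rest')).2.length ≤ n := by
            have h1 := pvGpD_len rest'
            rw [hgp]
            show (pvGpD rest').2.length ≤ n
            simp at hl
            omega
          have hPr : pvP (pvGpD ('>' :: d :: rest')).2 := by
            rw [hsnd]; exact pvP_drop hP _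
          obtain ⟨ihf, ihw, ihc⟩ := ih _ hlen2 hPr
          refine ⟨?_, ?_, ?_⟩
          · rw [pvTokF_gt]
            simp only [pvFlat, List.flatMap_cons, pvChars] at ihf ⊢
            rw [ihf]
            exact pvGpD_flat _
          · rw [pvTokF_gt]
            intro t ht
            rcases List.mem_cons.mp ht with ht | ht
            · subst ht
              refine ⟨by rw [hgp]; simp, pvGpD_digits _ hP⟩
            · exact ihw t ht
          · rw [pvTokF_gt]
            rw [List.isChain_cons]
            refine ⟨?_, ihc⟩
            intro b hb
            have := pvTokF_head_not_grp _ (pvGpD_stop ('>' :: d :: rest')) b hb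
            simp [pvNoAdj, this]
      · have hPr : pvP rest := by
          have := pvP_drop hP 1
          simpa using this
        obtain ⟨ihf, ihw, ihc⟩ := ih rest (by simp at hl; omega) hPr
        refine ⟨?_, ?_, ?_⟩
        · rw [pvTokF_chr _ hc]
          simp only [pvFlat, List.flatMap_cons, pvChars] at ihf ⊢
          rw [ihf]; rfl
        · rw [pvTokF_chr _ hc]
          intro t ht
          rcases List.mem_cons.mp ht with ht | ht
          · subst ht; exact hc
          · exact ihw t ht
        · rw [pvTokF_chr _ hc, List.isChain_cons]
          exact ⟨fun b _ => by simp [pvNoAdj, pvIsGrp], ihc⟩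

-- ---- A-side: the ported loops compute the token semantics ----
theorem pvInnerA_spec {l : List Char} (hP : pvP l) : ∀ s i,
    pvInnerA l s i = (s + pvSum (pvGpD (l.drop i)).1, i + 2 * (pvGpD (l.drop i)).1.length) := by
  intro s i
  refine pvInnerA.induct l
    (fun s i => pvInnerA l s i =
      (s + pvSum (pvGpD (l.drop i)).1, i + 2 * (pvGpD (l.drop i)).1.length)) ?_ ?_ s i
  · intro s i h ih
    obtain ⟨hi, hc⟩ := h
    have hi1 : i + 1 < l.length := pvP_succ_lt hP hi hc
    have hdrop : l.drop i = '>' :: l.getD (i+1) ' ' :: l.drop (i+2) := by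
      rw [List.drop_eq_getElem_cons hi, ← List.getD_eq_getElem l ' ' hi, hc]
      congr 1
      rw [List.drop_eq_getElem_cons hi1, ← List.getD_eq_getElem l ' ' hi1]
    rw [pvInnerA, dif_pos ⟨hi, hc⟩, ih, hdrop]
    simp [pvGpD, pvSum]
    constructor
    · ring
    · omega
  · intro s i h
    rw [pvInnerA, dif_neg h]
    by_cases hi : i < l.length
    · have hc : l.getD i ' ' ≠ '>' := fun hc => h ⟨hi, hc⟩
      have hdrop : l.drop i = l.getD i ' ' :: l.drop (i+1) := by
        rw [List.drop_eq_getElem_cons hi, ← List.getD_eq_getElem l ' ' hi]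
      have hgp : pvGpD (l.drop i) = ([], l.drop i) := by
        rw [hdrop]
        rcases hr : l.drop (i+1) with _ | ⟨d, r⟩
        · simp [pvGpD]
        · simp only [pvGpD, if_neg hc]
      rw [hgp]
      simp [pvSum]
    · have hdrop : l.drop i = [] := List.drop_eq_nil_of_le (by omega)
      rw [hdrop]
      simp [pvGpD, pvSum]

theorem pvLoopA_spec {l : List Char} (hP : pvP l) : ∀ i res,
    pvLoopA l res i = pvSpecA res (pvTokF (l.drop i)) := by
  suffices H : ∀ n i res, l.length - i ≤ n →
      pvLoopA l res i = pvSpecA res (pvTokF (l.drop i)) by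
    exact fun i res => H (l.length - i) i res (le_refl _)
  intro n
  induction n with
  | zero =>
    intro i res hn
    have hi : ¬ i < l.length := by omega
    rw [pvLoopA, dif_neg hi, List.drop_eq_nil_of_le (by omega), pvTokF_nil]
    simp [pvSpecA]
  | succ n ih =>
    intro i res hn
    by_cases hi : i < l.length
    · rw [pvLoopA, dif_pos hi]
      by_cases hc : l.getD i ' ' = '>'
      · simp only [hc, ite_true]
        have hi1 : i + 1 < l.length := pvP_succ_lt hP hi hc
        have hdrop : l.drop i = '>' :: l.getD (i+1) ' ' :: l.drop (i+2) := by
          rw [List.drop_eq_getElem_cons hi, ← List.getD_eq_getElem l ' ' hi, hc]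
          congr 1
          rw [List.drop_eq_getElem_cons hi1, ← List.getD_eq_getElem l ' ' hi1]
        have hIA := pvInnerA_spec hP (pvCharInt (l.getD (i + 1) ' ')) (i + 2)
        set k := (pvGpD (l.drop (i+2))).1.length with hk
        have hidx : i + 2 + 2 * k - 1 + 1 = i + 2 + 2 * k := by omega
        have hgp : pvGpD (l.drop i) =
            (l.getD (i+1) ' ' :: (pvGpD (l.drop (i+2))).1, (pvGpD (l.drop (i+2))).2) := by
          rw [hdrop]; simp [pvGpD]
        have hgp1 : (pvGpD (l.drop i)).1 =
            l.getD (i+1) ' ' :: (pvGpD (l.drop (i+2))).1 := by rw [hgp]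
        have hsnd : (pvGpD (l.drop i)).2 = l.drop (i + 2 + 2 * k) := by
          have h2 : (pvGpD (l.drop i)).2 = (pvGpD (l.drop (i+2))).2 := by rw [hgp]
          rw [h2, pvGpD_snd_drop (l.drop (i+2)), List.drop_drop, ← hk]
        have hIA1 : (pvInnerA l (pvCharInt (l.getD (i + 1) ' ')) (i + 2)).1 =
            pvSum ((pvGpD (l.drop i)).1) := by
          rw [hIA, hgp1]; simp [pvSum]
        have hIA2 : (pvInnerA l (pvCharInt (l.getD (i + 1) ' ')) (i + 2)).2 =
            i + 2 + 2 * k := by rw [hIA]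
        rw [hIA1, hIA2, hidx]
        rw [hdrop, pvTokF_gt, ← hdrop]
        simp only [pvSpecA]
        rw [hsnd]
        exact ih (i + 2 + 2 * k) _ (by omega)
      · simp only [if_neg hc]
        have hdrop : l.drop i = l.getD i ' ' :: l.drop (i+1) := by
          rw [List.drop_eq_getElem_cons hi, ← List.getD_eq_getElem l ' ' hi]
        rw [hdrop, pvTokF_chr _ hc]
        simp only [pvSpecA]
        exact ih (i+1) _ (by omega)
    · rw [pvLoopA, dif_neg hi, List.drop_eq_nil_of_le (by omega), pvTokF_nil]
      simp [pvSpecA]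

-- ---- the stack semantics equals the pending-counter fold ----
theorem pvCharInt_nonneg {d : Char} (h : d.isDigit = true) : 0 ≤ pvCharInt d := by
  have h48 : 48 ≤ d.toNat := by
    simp [Char.isDigit] at h
    have := UInt32.le_iff_toNat_le.mp h.1
    unfold Char.toNat
    exact this
  unfold pvCharInt
  omega

theorem pvSum_pos {ds : List Char} (h : ∀ d ∈ ds, d.isDigit = true) :
    (0 < pvSum ds) ↔ pvAnyPos ds = true := by
  induction ds with
  | nil => simp [pvSum, pvAnyPos]
  | cons d t ih =>
    have hd := h d (by simp)
    have ht : ∀ x ∈ t, x.isDigit = true := fun x hx => h x (by simp [hx])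
    have h1 : 0 ≤ pvCharInt d := pvCharInt_nonneg hd
    have h2 : 0 ≤ pvSum t := by
      unfold pvSum
      apply List.sum_nonneg
      intro x hx
      simp at hx
      obtain ⟨y, hy, hxy⟩ := hx
      subst hxy
      exact pvCharInt_nonneg (ht y hy)
    have h3 : (pvAnyPos (d :: t) = true) ↔ (0 < pvCharInt d ∨ pvAnyPos t = true) := by
      simp [pvAnyPos]
    rw [h3, ← ih ht]
    show 0 < pvCharInt d + pvSum t ↔ _
    omega

theorem pvDropN_nil (n : Nat) : pvDropN n [] = [] := by
  simp [pvDropN]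

theorem pvDropN_zero (l : List Char) : pvDropN 0 l = l := by
  simp [pvDropN]

theorem pvDropN_append {p : Nat} (res : List Char) (c : Char) (h : 0 < p) :
    pvDropN p (res ++ [c]) = pvDropN (p - 1) res := by
  simp only [pvDropN, List.length_append, List.length_cons, List.length_nil]
  rw [List.take_append]
  rw [show res.length + (0+1) - p - res.length = 0 by omega]
  simp only [List.take_zero, List.append_nil]
  congr 1
  omega

theorem pvDropN_dropLast (p : Nat) (res : List Char) :
    pvDropN p res.dropLast = pvDropN (p + 1) res := by
  simp only [pvDropN, List.dropLast_eq_take, List.length_take, List.take_take]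
  congr 1
  omega

theorem pvSpecA_fold : ∀ (ts : List PvTok) (res : List Char), (∀ t ∈ ts, pvWf1 t) →
    pvSpecA res ts =
      pvDropN (List.foldl pvStepB (0, []) ts.reverse).1 res ++
        (List.foldl pvStepB (0, []) ts.reverse).2.reverse := by
  intro ts
  induction ts with
  | nil => intro res _; simp [pvSpecA, pvDropN_zero]
  | cons t ts' ih =>
    intro res hw
    have hw' : ∀ x ∈ ts', pvWf1 x := fun x hx => hw x (by simp [hx])
    have hwt : pvWf1 t := hw t (by simp)
    rw [List.reverse_cons, List.foldl_append]
    set st := List.foldl pvStepB (0, ([] : List Char)) ts'.reverse with hst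
    simp only [List.foldl_cons, List.foldl_nil]
    cases t with
    | chr c =>
      simp only [pvSpecA]
      rw [ih (res ++ [c]) hw']
      by_cases hp : 0 < st.1
      · simp only [pvStepB, if_pos hp]
        rw [pvDropN_append res c hp]
      · simp only [pvStepB, if_neg hp]
        have h0 : st.1 = 0 := by omega
        rw [h0, pvDropN_zero, pvDropN_zero]
        simp [List.reverse_append]
    | grp ds =>
      simp only [pvSpecA]
      rw [ih _ hw']
      obtain ⟨hne, hdig⟩ := hwt
      by_cases hb : pvAnyPos ds = true
      · have hs : 0 < pvSum ds := (pvSum_pos hdig).mpr hb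
        simp only [pvStepB, hb, if_true]
        by_cases hr : res = []
        · subst hr
          rw [if_neg (by simp)]
          rw [pvDropN_nil, pvDropN_nil]
        · rw [if_pos ⟨hr, hs⟩, pvDropN_dropLast]
      · have hs : ¬ 0 < pvSum ds := fun hcon => hb ((pvSum_pos hdig).mp hcon)
        rw [if_neg (by tauto)]
        simp [pvStepB, hb]

-- ---- B-side: last characters of a token list are never '>' ----
theorem pvChars_ne_nil {t : PvTok} (h : pvWf1 t) : pvChars t ≠ [] := by
  cases t with
  | chr c => simp [pvChars]
  | grp ds =>
    obtain ⟨hne, _⟩ := h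
    cases ds with
    | nil => simp at hne
    | cons d t => simp [pvChars, pvPairs]

theorem pvFlat_getLast {ts : List PvTok} (hw : ∀ t ∈ ts, pvWf1 t) {i : Nat}
    (hi : i + 1 = (pvFlat ts).length) : (pvFlat ts).getD i ' ' ≠ '>' := by
  rcases List.eq_nil_or_concat' ts with hts | ⟨ts', t, hts⟩
  · subst hts; simp [pvFlat] at hi
  · subst hts
    have hwt : pvWf1 t := hw t (by simp)
    have hcne : pvChars t ≠ [] := pvChars_ne_nil hwt
    have hfl : pvFlat (ts' ++ [t]) = pvFlat ts' ++ pvChars t := by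
      simp [pvFlat]
    have hlast : (pvFlat (ts' ++ [t])).getLast? = (pvChars t).getLast? := by
      rw [hfl]
      exact List.getLast?_append_of_ne_nil _ hcne
    have hgetd : (pvFlat (ts' ++ [t])).getD i ' ' = ((pvChars t).getLast?).getD ' ' := by
      rw [List.getD_eq_getElem?_getD, ← hlast, List.getLast?_eq_getElem?,
        show (pvFlat (ts' ++ [t])).length - 1 = i by omega]
    rw [hgetd]
    cases t with
    | chr c =>
      simp only [pvChars, List.getLast?_singleton, Option.getD_some]
      exact hwt
    | grp ds =>
      obtain ⟨hne, hdig⟩ := hwt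
      rcases List.eq_nil_or_concat' ds with hds | ⟨ds', d, hds⟩
      · exact absurd hds hne
      · subst hds
        have : pvPairs (ds' ++ [d]) = pvPairs ds' ++ ['>', d] := by
          rw [pvPairs_append]; rfl
        simp only [pvChars, this]
        rw [List.getLast?_append_of_ne_nil _ (by simp)]
        simp only [List.getLast?, Option.getD_some]
        have hd : d.isDigit = true := hdig d (by simp)
        intro hcon
        rw [show (['>', d].getLast (by simp)) = d by rfl] at hcon
        subst hcon
        simp at hd

theorem pvInnerB_spec : ∀ (ds : List Char) (l F0 : List Char) (b : Bool),
    l.take (F0.length + 2 * ds.length) = F0 ++ pvPairs ds →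
    F0.length + 2 * ds.length ≤ l.length →
    ¬(2 ≤ F0.length ∧ l.getD (F0.length - 2) ' ' = '>') →
    pvInnerB l b (F0.length + 2 * ds.length) = (b || pvAnyPos ds, F0.length) := by
  intro ds
  induction ds using List.reverseRecOn with
  | nil =>
    intro l F0 b h1 h2 h3
    simp only [List.length_nil, Nat.mul_zero, Nat.add_zero]
    rw [pvInnerB, dif_neg h3]
    simp [pvAnyPos]
  | append_singleton ds' d ih =>
    intro l F0 b h1 h2 h3
    have hlen : (ds' ++ [d]).length = ds'.length + 1 := by simp
    have hpl : (F0 ++ pvPairs ds').length = F0.length + 2 * ds'.length := by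
      simp [pvPairs_length]
    have hsplit : F0 ++ pvPairs (ds' ++ [d]) = (F0 ++ pvPairs ds') ++ ['>', d] := by
      rw [pvPairs_append, ← List.append_assoc]
      rfl
    have hj : F0.length + 2 * (ds' ++ [d]).length = F0.length + 2 * ds'.length + 2 := by
      rw [hlen]; omega
    have hgt : l.getD (F0.length + 2 * ds'.length) ' ' = '>' := by
      rw [← pvGetD_take l (F0.length + 2 * (ds' ++ [d]).length) _ (by rw [hj]; omega),
        h1, hsplit, List.getD_eq_getElem?_getD,
        List.getElem?_append_right (by rw [hpl]),
        show F0.length + 2 * ds'.length - (F0 ++ pvPairs ds').length = 0 by omega]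
      rfl
    have hd : l.getD (F0.length + 2 * ds'.length + 1) ' ' = d := by
      rw [← pvGetD_take l (F0.length + 2 * (ds' ++ [d]).length) _ (by rw [hj]; omega),
        h1, hsplit, List.getD_eq_getElem?_getD,
        List.getElem?_append_right (by rw [hpl]; omega),
        show F0.length + 2 * ds'.length + 1 - (F0 ++ pvPairs ds').length = 1 by omega]
      rfl
    rw [hj, pvInnerB,
      dif_pos ⟨by omega, by
        rw [show F0.length + 2 * ds'.length + 2 - 2 = F0.length + 2 * ds'.length by omega]
        exact hgt⟩]
    rw [show F0.length + 2 * ds'.length + 2 - 2 = F0.length + 2 * ds'.length by omega,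
      show F0.length + 2 * ds'.length + 2 - 1 = F0.length + 2 * ds'.length + 1 by omega, hd]
    have h1' : l.take (F0.length + 2 * ds'.length) = F0 ++ pvPairs ds' := by
      have h5 : l.take (F0.length + 2 * ds'.length) =
          (l.take (F0.length + 2 * (ds' ++ [d]).length)).take (F0.length + 2 * ds'.length) := by
        rw [List.take_take]
        congr 1
        rw [hj]; omega
      rw [h5, h1, hsplit, List.take_left' hpl]
    rw [ih l F0 (b || decide (0 < pvCharInt d)) h1' (by omega) h3]
    have hany : pvAnyPos (ds' ++ [d]) = (pvAnyPos ds' || decide (0 < pvCharInt d)) := by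
      simp [pvAnyPos]
    rw [hany]
    congr 1
    cases b <;> cases pvAnyPos ds' <;> cases (decide (0 < pvCharInt d)) <;> rfl

theorem pvLoopB_spec : ∀ (ts : List PvTok) (l kept : List Char) (p j : Nat),
    (∀ t ∈ ts, pvWf1 t) → List.IsChain pvNoAdj ts →
    j ≤ l.length → l.take j = pvFlat ts →
    pvLoopB l kept p j = (List.foldl pvStepB (p, kept) ts.reverse).2 := by
  intro ts
  induction ts using List.reverseRecOn with
  | nil =>
    intro l kept p j _ _ hj h4
    have hj0 : j = 0 := by
      have hlen := congrArg List.length h4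
      rw [List.length_take, show pvFlat ([] : List PvTok) = [] from rfl] at hlen
      simp only [List.length_nil] at hlen
      omega
    subst hj0
    rw [pvLoopB, dif_neg (by omega)]
    simp
  | append_singleton ts' t ih =>
    intro l kept p j hw hch hj h4
    have hw' : ∀ x ∈ ts', pvWf1 x := fun x hx => hw x (by simp [hx])
    have hwt : pvWf1 t := hw t (by simp)
    have hch' : List.IsChain pvNoAdj ts' := (List.isChain_append.mp hch).1
    have hfl : pvFlat (ts' ++ [t]) = pvFlat ts' ++ pvChars t := by simp [pvFlat]
    set n := (pvFlat ts').length with hn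
    have hjlen : j = n + (pvChars t).length := by
      have := congrArg List.length h4
      rw [hfl] at this
      simp at this
      omega
    have hrev : (ts' ++ [t]).reverse = t :: ts'.reverse := by simp
    rw [hrev, List.foldl_cons]
    have htake' : l.take n = pvFlat ts' := by
      have h5 : l.take n = (l.take j).take n := by
        rw [List.take_take]
        congr 1
        omega
      rw [h5, h4, hfl, List.take_left' hn.symm]
    have hgetpre : ∀ i, i < n → l.getD i ' ' = (pvFlat ts').getD i ' ' := by
      intro i hi
      rw [← pvGetD_take l j i (by omega), h4, hfl, List.getD_eq_getElem?_getD,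
        List.getElem?_append_left (by omega), ← List.getD_eq_getElem?_getD]
    cases t with
    | chr c =>
      have hcne : c ≠ '>' := hwt
      have hj1 : j = n + 1 := by simpa [pvChars] using hjlen
      have hg : ¬(2 ≤ j ∧ l.getD (j - 2) ' ' = '>') := by
        rintro ⟨h2j, hgt⟩
        rw [show j - 2 = n - 1 by omega, hgetpre (n - 1) (by omega)] at hgt
        exact pvFlat_getLast hw' (by omega) hgt
      have hc : l.getD n ' ' = c := by
        rw [← pvGetD_take l j n (by omega), h4, hfl, List.getD_eq_getElem?_getD,
          List.getElem?_append_right (by omega),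
          show n - (pvFlat ts').length = 0 by omega]
        rfl
      rw [pvLoopB, dif_pos (by omega), dif_neg hg]
      by_cases hp : 0 < p
      · rw [if_pos hp, show j - 1 = n by omega,
          ih l kept (p - 1) n hw' hch' (by omega) htake']
        simp [pvStepB, hp]
      · rw [if_neg hp, show j - 1 = n by omega, hc,
          ih l (kept ++ [c]) p n hw' hch' (by omega) htake']
        simp [pvStepB, hp]
    | grp ds =>
      obtain ⟨hne, hdig⟩ := hwt
      have hk1 : 1 ≤ ds.length := List.length_pos_iff.mpr hne
      have hj2 : j = n + 2 * ds.length := by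
        simpa [pvChars, pvPairs_length] using hjlen
      have hstop : ¬(2 ≤ n ∧ l.getD (n - 2) ' ' = '>') := by
        rintro ⟨h2n, hgt⟩
        rcases List.eq_nil_or_concat' ts' with hts | ⟨ts'', u, hts⟩
        · rw [hts] at hn
          simp [pvFlat] at hn
          omega
        · subst hts
          have hrel : pvNoAdj u (PvTok.grp ds) := by
            have hsp := List.isChain_append.mp hch
            exact hsp.2.2 u (by simp) (PvTok.grp ds) (by simp)
          cases u with
          | grp ds2 => exact absurd ⟨rfl, rfl⟩ hrel
          | chr c' =>
            have hfl2 : pvFlat (ts'' ++ [PvTok.chr c']) = pvFlat ts'' ++ [c'] := by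
              simp [pvFlat, pvChars]
            have hn2 : n = (pvFlat ts'').length + 1 := by
              rw [hn, hfl2]; simp
            have hw'' : ∀ x ∈ ts'', pvWf1 x := fun x hx => hw' x (by simp [hx])
            rw [hgetpre (n - 2) (by omega), hfl2, List.getD_eq_getElem?_getD,
              List.getElem?_append_left (by omega), ← List.getD_eq_getElem?_getD,
              show n - 2 = (pvFlat ts'').length - 1 by omega] at hgt
            exact pvFlat_getLast hw'' (by omega) hgt
      have hIB : pvInnerB l false j = (pvAnyPos ds, n) := by
        have hB := pvInnerB_spec ds l (pvFlat ts') false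
          (by rw [← hn, show n + 2 * ds.length = j by omega, h4, hfl]; rfl)
          (by rw [← hn]; omega) (by rw [← hn]; exact hstop)
        rw [← hn, show n + 2 * ds.length = j by omega] at hB
        simpa using hB
      have hgt : l.getD (j - 2) ' ' = '>' := by
        rcases List.eq_nil_or_concat' ds with h | ⟨ds', d, hds⟩
        · exact absurd h hne
        · subst hds
          have hj3 : j = n + 2 * ds'.length + 2 := by
            rw [hj2]
            simp
            omega
          have hch2 : pvChars (PvTok.grp (ds' ++ [d])) = pvPairs ds' ++ ['>', d] := by
            simp only [pvChars, pvPairs_append]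
            rfl
          rw [← pvGetD_take l j (j - 2) (by omega), h4, hfl, hch2, ← List.append_assoc,
            List.getD_eq_getElem?_getD,
            List.getElem?_append_right (by simp [pvPairs_length]; omega),
            show j - 2 - (pvFlat ts' ++ pvPairs ds').length = 0 by
              simp [pvPairs_length]; omega]
          rfl
      rw [pvLoopB, dif_pos (by omega), dif_pos ⟨by omega, hgt⟩]
      show pvLoopB l kept
          (if (pvInnerB l false j).1 then p + 1 else p) (pvInnerB l false j).2 = _
      rw [hIB]
      show pvLoopB l kept (if pvAnyPos ds then p + 1 else p) n = _
      rw [ih l kept (if pvAnyPos ds then p + 1 else p) n hw' hch' (by omega) htake']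
      simp [pvStepB]

-- ===== VERDICT (by name: the statement is the Claim_ definition above) =====
theorem explode_string_spec : Claim_equal_explode_string := by
  intro s _ hpre
  unfold Spec_explode_string explode_string explode_string_alt
  have hP : pvP s.toList := by
    intro i hi hc
    exact hpre i (List.mem_range.mpr hi) hc
  obtain ⟨hflat, hw, hch⟩ := pvTok_spec s.toList hP
  have hA : pvLoopA s.toList [] 0 = pvSpecA [] (pvTokF s.toList) := by
    simpa using pvLoopA_spec hP 0 []
  have hB : pvLoopB s.toList [] 0 s.toList.length =
      (List.foldl pvStepB (0, ([] : List Char)) (pvTokF s.toList).reverse).2 := by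
    apply pvLoopB_spec (pvTokF s.toList) _ _ _ _ hw hch (le_refl _)
    rw [List.take_of_length_le (by simp)]
    exact hflat.symm
  have hAB := pvSpecA_fold (pvTokF s.toList) [] hw
  rw [hA, hB, hAB, pvDropN_nil]
  simp
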